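-- pv_equiv track=rewrite | github.com/DianaTao/MindBridge | lambda_functions/emotion_fusion/deployment_handler.py | detect_emotion_patterns
-- ===== SOURCE A (Python) =====
-- from typing import Dict, List, Any, Optional
--
-- def detect_emotion_patterns(emotion_sequence: List[str]) -> str:
--     """
--     Detect patterns in emotion sequence
--     """
--     if len(emotion_sequence) < 3:
--         return 'insufficient_data'
--
--     # Check for cycles
--     if len(set(emotion_sequence)) == 1:
--         return 'constant'
--
--     # Check for alternating pattern
--     if len(emotion_sequence) >= 4:
--         alternating = all(emotion_sequence[i] == emotion_sequence[i+2]
--                          for i in range(len(emotion_sequence)-2))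
--         if alternating and emotion_sequence[0] != emotion_sequence[1]:
--             return 'alternating'
--
--     # Check for escalation/de-escalation
--     valence_map = {
--         'happy': 4, 'joy': 4, 'excited': 3, 'calm': 2, 'neutral': 1,
--         'confused': 0, 'sad': -1, 'angry': -2, 'fear': -2, 'disgusted': -2
--     }
--
--     valences = [valence_map.get(emotion.lower(), 0) for emotion in emotion_sequence]
--
--     if all(valences[i] <= valences[i+1] for i in range(len(valences)-1)):
--         return 'escalating_positive'
--     elif all(valences[i] >= valences[i+1] for i in range(len(valences)-1)):
--         return 'escalating_negative'
--
--     return 'variable'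
-- ===== SOURCE B (Python) =====
-- def detect_emotion_patterns(emotion_sequence):
--     """Single left-to-right pass computing all four pattern flags at once."""
--     n = len(emotion_sequence)
--     if n < 3:
--         return 'insufficient_data'
--
--     valence_map = {
--         'happy': 4, 'joy': 4, 'excited': 3, 'calm': 2, 'neutral': 1,
--         'confused': 0, 'sad': -1, 'angry': -2, 'fear': -2, 'disgusted': -2
--     }
--
--     const = alt = up = down = True
--     prev2 = None
--     prev = emotion_sequence[0]
--     prev_v = valence_map.get(prev.lower(), 0)
--     for e in emotion_sequence[1:]:
--         v = valence_map.get(e.lower(), 0)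
--         if e != prev:
--             const = False
--         if prev2 is not None and e != prev2:
--             alt = False
--         if prev_v > v:
--             up = False
--         if prev_v < v:
--             down = False
--         prev2, prev, prev_v = prev, e, v
--
--     if const:
--         return 'constant'
--     if n >= 4 and alt and emotion_sequence[0] != emotion_sequence[1]:
--         return 'alternating'
--     if up:
--         return 'escalating_positive'
--     if down:
--         return 'escalating_negative'
--     return 'variable'
-- ===== Notes on version B (the rewrite author's own statement) =====
-- stated objective: alternative
-- what changed: A's four separate scans (building a set for the constant check, an index loop for the alternating check, and two index loops over a valences list for monotonicity) are replaced by one left-to-right pass that maintains four boolean flags (constant, alternating, non-decreasing, non-increasing) simultaneously, followed by the same priority cascade.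
import Mathlib
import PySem

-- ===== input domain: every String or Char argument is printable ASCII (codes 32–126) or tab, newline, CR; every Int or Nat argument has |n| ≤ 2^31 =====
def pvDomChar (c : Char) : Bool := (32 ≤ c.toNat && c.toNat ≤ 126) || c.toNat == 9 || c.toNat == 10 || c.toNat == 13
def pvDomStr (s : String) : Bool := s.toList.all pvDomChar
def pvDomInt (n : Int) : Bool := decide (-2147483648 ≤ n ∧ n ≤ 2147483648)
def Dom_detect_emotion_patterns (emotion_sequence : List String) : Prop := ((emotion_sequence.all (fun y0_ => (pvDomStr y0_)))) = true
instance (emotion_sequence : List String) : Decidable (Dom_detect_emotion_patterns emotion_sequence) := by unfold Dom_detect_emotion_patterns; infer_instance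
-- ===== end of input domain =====

-- B replaces A's four separate scans (set build + three index loops) by one left-to-right
-- pass computing all four pattern flags at once; objective: alternative (single pass).

-- valence_map.get(e.lower(), 0) — identical literal in both Pythons
def pvValenceMap : PySem.Dict String Int :=
  PySem.Dict.ofList [("happy", 4), ("joy", 4), ("excited", 3), ("calm", 2), ("neutral", 1),
    ("confused", 0), ("sad", -1), ("angry", -2), ("fear", -2), ("disgusted", -2)]

def pvVal (e : String) : Int := pvValenceMap.getD (PySem.Str.lower e) 0

-- ===== PORT A =====
def detect_emotion_patterns (emotion_sequence : List String) : String :=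
  if emotion_sequence.length < 3 then "insufficient_data"
  else if PySem.Set.len (PySem.Set.ofList emotion_sequence) = 1 then "constant"
  else
    -- if len >= 4: alternating = all(...); if alternating and seq[0] != seq[1]: return 'alternating'
    let step1 : Option String :=
      if 4 ≤ emotion_sequence.length then
        let alternating := (PySem.List.pyRange 0 ((emotion_sequence.length : Int) - 2) 1).all
          (fun i => PySem.List.pyGetD emotion_sequence i "" == PySem.List.pyGetD emotion_sequence (i + 2) "")
        if alternating && !(PySem.List.pyGetD emotion_sequence 0 "" == PySem.List.pyGetD emotion_sequence 1 "")
        then some "alternating" else none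
      else none
    match step1 with
    | some r => r
    | none =>
      let valences := emotion_sequence.map (fun e => pvVal e)
      if (PySem.List.pyRange 0 ((valences.length : Int) - 1) 1).all
          (fun i => decide (PySem.List.pyGetD valences i 0 ≤ PySem.List.pyGetD valences (i + 1) 0))
      then "escalating_positive"
      else if (PySem.List.pyRange 0 ((valences.length : Int) - 1) 1).all
          (fun i => decide (PySem.List.pyGetD valences i 0 ≥ PySem.List.pyGetD valences (i + 1) 0))
      then "escalating_negative"
      else "variable"

-- ===== PORT B =====
-- state: (const, alt, up, down, prev2, prev, prev_v)
def pvStep (st : Bool × Bool × Bool × Bool × Option String × String × Int) (e : String) :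
    Bool × Bool × Bool × Bool × Option String × String × Int :=
  let (const, alt, up, down, prev2, prev, prev_v) := st
  let v := pvVal e
  (const && (e == prev),
   alt && (match prev2 with | none => true | some q => e == q),
   up && !(decide (prev_v > v)),
   down && !(decide (prev_v < v)),
   some prev, e, v)

def detect_emotion_patterns_alt (emotion_sequence : List String) : String :=
  if emotion_sequence.length < 3 then "insufficient_data"
  else
    match emotion_sequence with
    | [] => "insufficient_data"  -- unreachable: length ≥ 3
    | p :: rest =>
      let r := rest.foldl pvStep (true, true, true, true, none, p, pvVal p)
      if r.1 then "constant"
      else if decide (4 ≤ emotion_sequence.length) && r.2.1 &&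
              !(PySem.List.pyGetD emotion_sequence 0 "" == PySem.List.pyGetD emotion_sequence 1 "")
      then "alternating"
      else if r.2.2.1 then "escalating_positive"
      else if r.2.2.2.1 then "escalating_negative"
      else "variable"

-- ===== PRECONDITION & SPEC =====
def Spec_detect_emotion_patterns (emotion_sequence : List String) (out : String) : Prop := out = detect_emotion_patterns_alt emotion_sequence
instance (emotion_sequence : List String) (out : String) : Decidable (Spec_detect_emotion_patterns emotion_sequence out) := by unfold Spec_detect_emotion_patterns; infer_instance

-- ===== CLAIM (what is proved, stated in full; the proofs are below) =====
def Claim_equal_detect_emotion_patterns : Prop := ∀ (emotion_sequence : List String), Dom_detect_emotion_patterns emotion_sequence → Spec_detect_emotion_patterns emotion_sequence (detect_emotion_patterns emotion_sequence)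

-- ===== LEMMAS AND PROOFS =====

-- recursive characterizations of the four flags of B's single pass
def adjEq (p : String) : List String → Bool
  | [] => true
  | e :: t => (e == p) && adjEq e t

def altB : Option String → String → List String → Bool
  | _, _, [] => true
  | p2, p, e :: t => (match p2 with | none => true | some q => e == q) && altB (some p) e t

def monoLe (p : String) : List String → Bool
  | [] => true
  | e :: t => !(decide (pvVal p > pvVal e)) && monoLe e t

def monoGe (p : String) : List String → Bool
  | [] => true
  | e :: t => !(decide (pvVal p < pvVal e)) && monoGe e t

theorem scan_const (rest : List String) : ∀ c a u d p2 p pv,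
    (List.foldl pvStep (c, a, u, d, p2, p, pv) rest).1 = (c && adjEq p rest) := by
  induction rest with
  | nil => intros; simp [adjEq]
  | cons e t ih =>
      intros c a u d p2 p pv
      simp [List.foldl, pvStep, adjEq, ih, Bool.and_assoc]

theorem scan_alt (rest : List String) : ∀ c a u d p2 p pv,
    (List.foldl pvStep (c, a, u, d, p2, p, pv) rest).2.1 = (a && altB p2 p rest) := by
  induction rest with
  | nil => intros; simp [altB]
  | cons e t ih =>
      intros c a u d p2 p pv
      simp [List.foldl, pvStep, altB, ih, Bool.and_assoc]

theorem scan_up (rest : List String) : ∀ c a u d p2 p,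
    (List.foldl pvStep (c, a, u, d, p2, p, pvVal p) rest).2.2.1 = (u && monoLe p rest) := by
  induction rest with
  | nil => intros; simp [monoLe]
  | cons e t ih =>
      intros c a u d p2 p
      simp [List.foldl, pvStep, monoLe, ih, Bool.and_assoc]

theorem scan_down (rest : List String) : ∀ c a u d p2 p,
    (List.foldl pvStep (c, a, u, d, p2, p, pvVal p) rest).2.2.2.1 = (d && monoGe p rest) := by
  induction rest with
  | nil => intros; simp [monoGe]
  | cons e t ih =>
      intros c a u d p2 p
      simp [List.foldl, pvStep, monoGe, ih, Bool.and_assoc]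

theorem adjEq_iff (rest : List String) : ∀ p, adjEq p rest = true ↔ ∀ x ∈ rest, x = p := by
  induction rest with
  | nil => intro p; simp [adjEq]
  | cons e t ih =>
      intro p
      simp only [adjEq, Bool.and_eq_true, beq_iff_eq, ih, List.mem_cons]
      constructor
      · rintro ⟨rfl, h⟩ x hx
        rcases hx with rfl | hx
        · rfl
        · exact h x hx
      · intro h
        have he : e = p := h e (Or.inl rfl)
        exact ⟨he, fun x hx => (h x (Or.inr hx)).trans he.symm⟩

theorem nodup_all_eq {p : String} {l : List String} (hn : l.Nodup) (hp : p ∈ l)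
    (hall : ∀ x ∈ l, x = p) : l = [p] := by
  cases l with
  | nil => simp at hp
  | cons a t =>
    have ha : a = p := hall a (by simp)
    cases t with
    | nil => simp [ha]
    | cons b u =>
      have hb : b = p := hall b (by simp)
      rw [List.nodup_cons] at hn
      exact absurd (by simp [ha, hb]) hn.1

theorem setlen_one (p : String) (rest : List String) :
    PySem.Set.len (PySem.Set.ofList (p :: rest)) = 1 ↔ ∀ x ∈ rest, x = p := by
  constructor
  · intro h x hx
    have hlen : (PySem.Set.ofList (p :: rest)).length = 1 := by
      simpa [PySem.Set.len] using h
    obtain ⟨a, ha⟩ := List.length_eq_one_iff.1 hlen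
    have hp : p ∈ PySem.Set.ofList (p :: rest) := (PySem.Set.mem_ofList _ _).2 (by simp)
    have hx' : x ∈ PySem.Set.ofList (p :: rest) := (PySem.Set.mem_ofList _ _).2 (by simp [hx])
    rw [ha] at hp hx'
    simp at hp hx'
    rw [hx', hp]
  · intro h
    have heq : PySem.Set.ofList (p :: rest) = [p] := by
      apply nodup_all_eq (PySem.Set.nodup_ofList _)
      · exact (PySem.Set.mem_ofList _ _).2 (by simp)
      · intro x hx
        have := (PySem.Set.mem_ofList _ _).1 hx
        rcases List.mem_cons.1 this with rfl | hx'
        · rfl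
        · exact h x hx'
    simp [PySem.Set.len, heq]

def gapProp (l : List String) : Prop := ∀ i : Nat, (h : i + 2 < l.length) → l[i] = l[i + 2]

def leProp (l : List Int) : Prop := ∀ i : Nat, (h : i + 1 < l.length) → l[i] ≤ l[i + 1]

def geProp (l : List Int) : Prop := ∀ i : Nat, (h : i + 1 < l.length) → l[i] ≥ l[i + 1]

theorem altB_some_iff (rest : List String) : ∀ q p, altB (some q) p rest = true ↔ gapProp (q :: p :: rest) := by
  induction rest with
  | nil =>
      intro q p
      constructor
      · intro _ i hi; simp at hi
      · intro _; rfl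
  | cons e t ih =>
      intro q p
      simp only [altB, Bool.and_eq_true, beq_iff_eq, ih]
      constructor
      · rintro ⟨rfl, hg⟩ i hi
        match i with
        | 0 => simp
        | i + 1 =>
            have := hg i (by simp at hi ⊢; omega)
            simpa using this
      · intro hg
        refine ⟨?_, ?_⟩
        · have := hg 0 (by simp)
          simpa using this.symm
        · intro i hi
          have := hg (i + 1) (by simp at hi ⊢; omega)
          simpa using this

theorem altB_none_iff (p : String) (rest : List String) :
    altB none p rest = true ↔ gapProp (p :: rest) := by
  cases rest with
  | nil =>
      constructor
      · intro _ i hi; simp at hi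
      · intro _; rfl
  | cons e t =>
      have h := altB_some_iff t p e
      simp only [altB, Bool.true_and]
      exact h

theorem monoLe_iff (rest : List String) : ∀ p, monoLe p rest = true ↔ leProp ((p :: rest).map pvVal) := by
  induction rest with
  | nil =>
      intro p
      constructor
      · intro _ i hi; simp at hi
      · intro _; rfl
  | cons e t ih =>
      intro p
      simp only [monoLe, Bool.and_eq_true, Bool.not_eq_true', decide_eq_false_iff_not, not_lt, ih]
      constructor
      · rintro ⟨hle, hg⟩ i hi
        match i with
        | 0 => simpa using hle
        | i + 1 =>
            have := hg i (by simp at hi ⊢; omega)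
            simpa using this
      · intro hg
        refine ⟨by simpa using hg 0 (by simp), ?_⟩
        intro i hi
        have := hg (i + 1) (by simp at hi ⊢; omega)
        simpa using this

theorem monoGe_iff (rest : List String) : ∀ p, monoGe p rest = true ↔ geProp ((p :: rest).map pvVal) := by
  induction rest with
  | nil =>
      intro p
      constructor
      · intro _ i hi; simp at hi
      · intro _; rfl
  | cons e t ih =>
      intro p
      simp only [monoGe, Bool.and_eq_true, Bool.not_eq_true', decide_eq_false_iff_not, not_lt, ih]
      constructor
      · rintro ⟨hle, hg⟩ i hi
        match i with
        | 0 => simpa using hle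
        | i + 1 =>
            have := hg i (by simp at hi ⊢; omega)
            simpa using this
      · intro hg
        refine ⟨by simpa using hg 0 (by simp), ?_⟩
        intro i hi
        have := hg (i + 1) (by simp at hi ⊢; omega)
        simpa using this

theorem altA_iff (es : List String) :
    ((PySem.List.pyRange 0 ((es.length : Int) - 2) 1).all
        (fun i => PySem.List.pyGetD es i "" == PySem.List.pyGetD es (i + 2) "")) = true
      ↔ gapProp es := by
  rw [List.all_eq_true]
  constructor
  · intro h i hi
    have hm : (i : Int) ∈ PySem.List.pyRange 0 ((es.length : Int) - 2) 1 := by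
      rw [PySem.List.mem_pyRange_one]
      constructor
      · exact_mod_cast Int.natCast_nonneg i
      · omega
    have hx := h _ hm
    have h2 : ((i : Int) + 2) = ((i + 2 : Nat) : Int) := by push_cast; ring
    rw [h2, PySem.List.pyGetD_natCast, PySem.List.pyGetD_natCast, beq_iff_eq] at hx
    rwa [List.getD_eq_getElem _ _ (by omega), List.getD_eq_getElem _ _ hi] at hx
  · intro hg x hx
    rw [PySem.List.mem_pyRange_one] at hx
    obtain ⟨h0, hlt⟩ := hx
    have hi : x.toNat + 2 < es.length := by omega
    have hx1 : x = ((x.toNat : Nat) : Int) := by omega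
    have h2 : (((x.toNat : Nat) : Int) + 2) = ((x.toNat + 2 : Nat) : Int) := by push_cast; ring
    rw [hx1, h2, PySem.List.pyGetD_natCast, PySem.List.pyGetD_natCast, beq_iff_eq,
      List.getD_eq_getElem _ _ (by omega), List.getD_eq_getElem _ _ hi]
    exact hg x.toNat hi

theorem leA_iff (vs : List Int) :
    ((PySem.List.pyRange 0 ((vs.length : Int) - 1) 1).all
        (fun i => decide (PySem.List.pyGetD vs i 0 ≤ PySem.List.pyGetD vs (i + 1) 0))) = true
      ↔ leProp vs := by
  rw [List.all_eq_true]
  constructor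
  · intro h i hi
    have hm : (i : Int) ∈ PySem.List.pyRange 0 ((vs.length : Int) - 1) 1 := by
      rw [PySem.List.mem_pyRange_one]
      constructor
      · exact_mod_cast Int.natCast_nonneg i
      · omega
    have hx := h _ hm
    have h2 : ((i : Int) + 1) = ((i + 1 : Nat) : Int) := by push_cast; ring
    rw [h2, PySem.List.pyGetD_natCast, PySem.List.pyGetD_natCast, decide_eq_true_eq] at hx
    rwa [List.getD_eq_getElem _ _ (by omega), List.getD_eq_getElem _ _ hi] at hx
  · intro hg x hx
    rw [PySem.List.mem_pyRange_one] at hx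
    obtain ⟨h0, hlt⟩ := hx
    have hi : x.toNat + 1 < vs.length := by omega
    have hx1 : x = ((x.toNat : Nat) : Int) := by omega
    have h2 : (((x.toNat : Nat) : Int) + 1) = ((x.toNat + 1 : Nat) : Int) := by push_cast; ring
    rw [hx1, h2, PySem.List.pyGetD_natCast, PySem.List.pyGetD_natCast, decide_eq_true_eq,
      List.getD_eq_getElem _ _ (by omega), List.getD_eq_getElem _ _ hi]
    exact hg x.toNat hi

theorem geA_iff (vs : List Int) :
    ((PySem.List.pyRange 0 ((vs.length : Int) - 1) 1).all
        (fun i => decide (PySem.List.pyGetD vs i 0 ≥ PySem.List.pyGetD vs (i + 1) 0))) = true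
      ↔ geProp vs := by
  rw [List.all_eq_true]
  constructor
  · intro h i hi
    have hm : (i : Int) ∈ PySem.List.pyRange 0 ((vs.length : Int) - 1) 1 := by
      rw [PySem.List.mem_pyRange_one]
      constructor
      · exact_mod_cast Int.natCast_nonneg i
      · omega
    have hx := h _ hm
    have h2 : ((i : Int) + 1) = ((i + 1 : Nat) : Int) := by push_cast; ring
    rw [h2, PySem.List.pyGetD_natCast, PySem.List.pyGetD_natCast, decide_eq_true_eq] at hx
    rwa [List.getD_eq_getElem _ _ (by omega), List.getD_eq_getElem _ _ hi] at hx
  · intro hg x hx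
    rw [PySem.List.mem_pyRange_one] at hx
    obtain ⟨h0, hlt⟩ := hx
    have hi : x.toNat + 1 < vs.length := by omega
    have hx1 : x = ((x.toNat : Nat) : Int) := by omega
    have h2 : (((x.toNat : Nat) : Int) + 1) = ((x.toNat + 1 : Nat) : Int) := by push_cast; ring
    rw [hx1, h2, PySem.List.pyGetD_natCast, PySem.List.pyGetD_natCast, decide_eq_true_eq,
      List.getD_eq_getElem _ _ (by omega), List.getD_eq_getElem _ _ hi]
    exact hg x.toNat hi

theorem altA_eq (p : String) (rest : List String) :
    ((PySem.List.pyRange 0 (((p :: rest).length : Int) - 2) 1).all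
        (fun i => PySem.List.pyGetD (p :: rest) i "" == PySem.List.pyGetD (p :: rest) (i + 2) ""))
      = altB none p rest :=
  Bool.eq_iff_iff.2 ((altA_iff (p :: rest)).trans (altB_none_iff p rest).symm)

theorem upA_eq (p : String) (rest : List String) :
    ((PySem.List.pyRange 0 ((((p :: rest).map pvVal).length : Int) - 1) 1).all
        (fun i => decide (PySem.List.pyGetD ((p :: rest).map pvVal) i 0 ≤
                          PySem.List.pyGetD ((p :: rest).map pvVal) (i + 1) 0)))
      = monoLe p rest :=
  Bool.eq_iff_iff.2 ((leA_iff _).trans (monoLe_iff rest p).symm)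

theorem downA_eq (p : String) (rest : List String) :
    ((PySem.List.pyRange 0 ((((p :: rest).map pvVal).length : Int) - 1) 1).all
        (fun i => decide (PySem.List.pyGetD ((p :: rest).map pvVal) i 0 ≥
                          PySem.List.pyGetD ((p :: rest).map pvVal) (i + 1) 0)))
      = monoGe p rest :=
  Bool.eq_iff_iff.2 ((geA_iff _).trans (monoGe_iff rest p).symm)

-- ===== VERDICT (by name: the statement is the Claim_ definition above) =====
theorem detect_emotion_patterns_spec : Claim_equal_detect_emotion_patterns := by
  unfold Claim_equal_detect_emotion_patterns
  intro es _
  unfold Spec_detect_emotion_patterns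
  unfold detect_emotion_patterns detect_emotion_patterns_alt
  by_cases hlen : es.length < 3
  · rw [if_pos hlen, if_pos hlen]
  · match es with
    | [] => simp at hlen
    | p :: rest =>
      rw [if_neg hlen, if_neg hlen]
      simp only [scan_const, scan_alt, scan_up, scan_down, altA_eq, upA_eq, downA_eq,
        Bool.true_and]
      by_cases hadj : adjEq p rest = true
      · rw [if_pos ((setlen_one p rest).2 ((adjEq_iff rest p).1 hadj)), hadj, if_pos rfl]
      · have hc : ¬ PySem.Set.len (PySem.Set.ofList (p :: rest)) = 1 := fun hc =>
          hadj ((adjEq_iff rest p).2 ((setlen_one p rest).1 hc))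
        rw [if_neg hc, Bool.not_eq_true] at *
        rw [hadj]
        simp only [Bool.false_eq_true, if_false]
        by_cases h4 : 4 ≤ (p :: rest).length
        · rw [if_pos h4, decide_eq_true h4]
          simp only [Bool.true_and]
          by_cases hb : (altB none p rest &&
              !(PySem.List.pyGetD (p :: rest) 0 "" == PySem.List.pyGetD (p :: rest) 1 "")) = true
          · rw [if_pos hb]
            rw [Bool.and_eq_true] at hb
            rw [hb.1, hb.2]
            simp
          · rw [if_neg hb]
            rw [Bool.not_eq_true, Bool.and_eq_false_iff] at hb
            rcases hb with hb | hb
            · simp [hb]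
            · have hp : (PySem.List.pyGetD (p :: rest) 0 "" == PySem.List.pyGetD (p :: rest) 1 "") = true := by
                cases h : (PySem.List.pyGetD (p :: rest) 0 "" == PySem.List.pyGetD (p :: rest) 1 "") with
                | true => rfl
                | false => rw [h] at hb; simp at hb
              rw [hp]
              simp
        · rw [if_neg h4, decide_eq_false h4]
          simp
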